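-- pv_equiv track=rewrite | github.com/SunwoongH/algorithm | Programmers/KakaoWinterInternship_2024/가장 많이 받은 선물.py | solution
-- ===== SOURCE A (Python) =====
-- def solution(friends, gifts):
--     # 인덱스 테이블
--     index_table = dict()
--     for i in range(len(friends)):
--         index_table[friends[i]] = i
--     # 선물 교환 기록
--     record = [[0 for _ in range(len(friends))] for _ in range(len(friends))]
--     for gift in gifts:
--         giver, taker = gift.split()
--         record[index_table[giver]][index_table[taker]] += 1
--     for i in range(len(friends)):
--         record[i][i] = -1
--     # 선물 지수 테이블
--     gift_rate_table = dict()
--     for i in range(len(friends)):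
--         give = 0
--         take = 0
--         for j in range(len(friends)):
--             give += record[i][j]
--             take += record[j][i]
--         gift_rate_table[friends[i]] = give - take
--     # 다음 달 선물 수
--     answer = []
--     for i in range(len(friends)):
--         temp = 0
--         for j in range(len(friends)):
--             if i == j:
--                 continue
--             if record[i][j] > record[j][i]:
--                 temp += 1
--             elif record[i][j] == record[j][i]:
--                 if gift_rate_table[friends[i]] > gift_rate_table[friends[j]]:
--                     temp += 1
--         answer.append(temp)
--     return max(answer)
-- ===== SOURCE B (Python) =====
-- def solution(friends, gifts):
--     # one pass: directed pair counts and each person's net gift rate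
--     cnt = {}
--     rate = {f: 0 for f in friends}
--     for gift in gifts:
--         giver, taker = gift.split()
--         cnt[(giver, taker)] = cnt.get((giver, taker), 0) + 1
--         rate[giver] += 1
--         rate[taker] -= 1
--     # baseline wins by rate ranking: wins[f] = #people with a strictly smaller rate
--     freq = {}
--     for f in friends:
--         freq[rate[f]] = freq.get(rate[f], 0) + 1
--     less = {}
--     acc = 0
--     for v in sorted(freq):
--         less[v] = acc
--         acc += freq[v]
--     wins = {}
--     for f in friends:
--         wins[f] = less[rate[f]]
--     # corrections only for pairs whose directed counts differ (at most one key per pair)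
--     for (a, b), c in cnt.items():
--         if a != b and (a < b or (b, a) not in cnt):
--             d = c - cnt.get((b, a), 0)
--             if d != 0:
--                 w, l = (a, b) if d > 0 else (b, a)
--                 if rate[w] <= rate[l]:
--                     wins[w] += 1
--                 if rate[l] > rate[w]:
--                     wins[l] -= 1
--     return max(wins.values())
-- ===== Notes on version B (the rewrite author's own statement) =====
-- stated objective: alternative
-- what changed: Replaces A's n*n matrix and full n^2 all-pairs comparison loop by a rank-and-correct algorithm: one pass builds a (giver,taker) pair counter and each person's net gift rate, baseline wins come from ranking the rates with a sorted frequency prefix-sum (no pair loop), and only pairs present in the counter with unequal directed counts receive a per-pair correction.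
-- outside the precondition, e.g. on solution(['c', 'c', 'b', 'b', 'a'], ['c a', 'a b', 'b c', 'b c']): A returns 3, B returns 2
import Mathlib
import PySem

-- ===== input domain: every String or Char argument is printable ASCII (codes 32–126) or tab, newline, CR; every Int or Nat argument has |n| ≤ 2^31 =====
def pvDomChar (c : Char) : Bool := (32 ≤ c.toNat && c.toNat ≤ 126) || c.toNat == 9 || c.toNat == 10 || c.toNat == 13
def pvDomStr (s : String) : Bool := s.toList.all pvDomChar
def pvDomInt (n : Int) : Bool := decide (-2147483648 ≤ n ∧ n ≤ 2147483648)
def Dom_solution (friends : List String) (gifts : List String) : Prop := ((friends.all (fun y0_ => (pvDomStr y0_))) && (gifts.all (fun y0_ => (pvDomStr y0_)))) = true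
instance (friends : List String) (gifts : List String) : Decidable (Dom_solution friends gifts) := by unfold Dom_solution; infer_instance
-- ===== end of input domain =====

-- B replaces A's n×n matrix and full n² all-pairs comparison loop by a rank-and-correct
-- algorithm: one pass builds a (giver,taker) pair counter and per-person net gift rates,
-- baseline wins come from ranking the rates via a sorted frequency prefix sum, and only
-- pairs present in the counter with unequal directed counts receive a correction
-- (objective: alternative — a different algorithm; return-value equivalence is what is proved).


-- ===== PORT A =====
-- fold body of A's gift loop, named so the proofs can speak about it
def pvRecStep (indexTable : PySem.Dict String Int) (rec : List (List Int)) (gift : String) :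
    List (List Int) :=
  match PySem.Str.split₀ gift with
  | [giver, taker] =>
    let gi := indexTable.getD giver 0
    let ti := indexTable.getD taker 0
    let row := PySem.List.pyGetD rec gi []
    PySem.List.pySetD rec gi (PySem.List.pySetD row ti (PySem.List.pyGetD row ti 0 + 1))
  | _ => rec

def solution (friends : List String) (gifts : List String) : Int :=
  let n : Int := PySem.List.len friends
  let indexTable : PySem.Dict String Int :=
    (PySem.List.pyRange 0 n 1).foldl
      (fun d i => d.insert (PySem.List.pyGetD friends i "") i) PySem.Dict.empty
  let record0 : List (List Int) :=
    (PySem.List.pyRange 0 n 1).map (fun _ => (PySem.List.pyRange 0 n 1).map (fun _ => (0:Int)))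
  let record1 := gifts.foldl (pvRecStep indexTable) record0
  let record2 := (PySem.List.pyRange 0 n 1).foldl (fun rec i =>
      PySem.List.pySetD rec i (PySem.List.pySetD (PySem.List.pyGetD rec i []) i (-1))) record1
  let giftRateTable : PySem.Dict String Int :=
    (PySem.List.pyRange 0 n 1).foldl (fun d i =>
      let gt := (PySem.List.pyRange 0 n 1).foldl
        (fun (s : Int × Int) j =>
          (s.1 + PySem.List.pyGetD (PySem.List.pyGetD record2 i []) j 0,
           s.2 + PySem.List.pyGetD (PySem.List.pyGetD record2 j []) i 0)) (0, 0)
      d.insert (PySem.List.pyGetD friends i "") (gt.1 - gt.2)) PySem.Dict.empty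
  let answer : List Int := (PySem.List.pyRange 0 n 1).foldl (fun ans i =>
      let temp := (PySem.List.pyRange 0 n 1).foldl (fun temp j =>
        if i = j then temp
        else if PySem.List.pyGetD (PySem.List.pyGetD record2 i []) j 0 >
                PySem.List.pyGetD (PySem.List.pyGetD record2 j []) i 0 then temp + 1
        else if PySem.List.pyGetD (PySem.List.pyGetD record2 i []) j 0 =
                PySem.List.pyGetD (PySem.List.pyGetD record2 j []) i 0 then
          (if giftRateTable.getD (PySem.List.pyGetD friends i "") 0 >
              giftRateTable.getD (PySem.List.pyGetD friends j "") 0 then temp + 1 else temp)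
        else temp) 0
      ans ++ [temp]) []
  (PySem.List.max? answer (fun x => x)).getD 0

-- ===== PORT B =====
-- the two dict updates done by B's single pass over gifts
def pvCntStep (c : PySem.Dict (String × String) Int) (gift : String) :
    PySem.Dict (String × String) Int :=
  match PySem.Str.split₀ gift with
  | [giver, taker] => c.insert (giver, taker) (c.getD (giver, taker) 0 + 1)
  | _ => c

def pvRateStep (r : PySem.Dict String Int) (gift : String) : PySem.Dict String Int :=
  match PySem.Str.split₀ gift with
  | [giver, taker] => (r.modify giver 0 (· + 1)).modify taker 0 (· - 1)
  | _ => r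

-- body of B's correction loop over cnt.items()
def pvCorrStep (cnt : PySem.Dict (String × String) Int) (rate : PySem.Dict String Int)
    (wins : PySem.Dict String Int) (kv : (String × String) × Int) : PySem.Dict String Int :=
  let a := kv.1.1
  let b := kv.1.2
  if a ≠ b ∧ (a < b ∨ ¬ cnt.contains (b, a) = true) then
    let d := kv.2 - cnt.getD (b, a) 0
    if d ≠ 0 then
      let w := if d > 0 then a else b
      let l := if d > 0 then b else a
      let wins1 := if rate.getD w 0 ≤ rate.getD l 0 then wins.modify w 0 (· + 1) else wins
      if rate.getD l 0 > rate.getD w 0 then wins1.modify l 0 (· - 1) else wins1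
    else wins
  else wins

def solution_alt (friends : List String) (gifts : List String) : Int :=
  let cr := gifts.foldl
      (fun (s : PySem.Dict (String × String) Int × PySem.Dict String Int) gift =>
        (pvCntStep s.1 gift, pvRateStep s.2 gift))
      (PySem.Dict.empty, friends.foldl (fun d f => d.insert f 0) PySem.Dict.empty)
  let cnt := cr.1
  let rate := cr.2
  let freq : PySem.Dict Int Int := friends.foldl
      (fun d f => d.insert (rate.getD f 0) (d.getD (rate.getD f 0) 0 + 1)) PySem.Dict.empty
  let less := ((PySem.List.sorted freq.keys (fun x => x) false).foldl
      (fun (s : PySem.Dict Int Int × Int) v => (s.1.insert v s.2, s.2 + freq.getD v 0))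
      (PySem.Dict.empty, 0)).1
  let wins := friends.foldl (fun d f => d.insert f (less.getD (rate.getD f 0) 0))
      PySem.Dict.empty
  let wins2 := cnt.items.foldl (pvCorrStep cnt rate) wins
  (PySem.List.max? wins2.values (fun x => x)).getD 0

-- ===== PRECONDITION & SPEC =====
-- Pre_ excludes the inputs on which A raises (empty friends: ValueError on max([]);
-- a gift that does not split into exactly two words: ValueError; a gift naming someone
-- outside friends: KeyError) and, although A returns there, lists with duplicate friend
-- names combined with a nonempty gift list, on which A's value depends on the accidental
-- collision of the last-wins index table with the per-position matrix rows (A counts a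
-- duplicated name once per position, B once per name) — a corner no statement of the
-- problem specifies.
def Pre_solution (friends : List String) (gifts : List String) : Prop :=
  friends ≠ [] ∧ (friends.Nodup ∨ gifts = []) ∧
    ∀ g ∈ gifts, (PySem.Str.split₀ g).length = 2 ∧ ∀ t ∈ PySem.Str.split₀ g, t ∈ friends
instance (friends : List String) (gifts : List String) : Decidable (Pre_solution friends gifts) := by
  unfold Pre_solution; infer_instance

def pvWitness_solution : List String × List String := (["alice", "bob"], ["alice bob"])

def Spec_solution (friends : List String) (gifts : List String) (out : Int) : Prop :=
  out = solution_alt friends gifts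
instance (friends : List String) (gifts : List String) (out : Int) :
    Decidable (Spec_solution friends gifts out) := by unfold Spec_solution; infer_instance

-- ===== CLAIM (what is proved, stated in full; the proofs are below) =====
def Claim_equal_solution : Prop := ∀ (friends : List String) (gifts : List String),
  Dom_solution friends gifts → Pre_solution friends gifts →
    Spec_solution friends gifts (solution friends gifts)












-- ===== LEMMAS AND PROOFS =====

def pvF (friends : List String) (i : Nat) : String := friends.getD i ""

-- injectivity of pvF on a Nodup list
theorem pvF_inj {friends : List String} (hnd : friends.Nodup) {i j : Nat}
    (hi : i < friends.length) (hj : j < friends.length)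
    (h : pvF friends i = pvF friends j) : i = j := by
  have hi' : pvF friends i = friends[i] := List.getD_eq_getElem friends "" hi
  have hj' : pvF friends j = friends[j] := List.getD_eq_getElem friends "" hj
  exact (List.Nodup.getElem_inj_iff hnd).mp (by rw [← hi', ← hj', h])

-- membership gives an index
theorem pvF_surj {friends : List String} {a : String} (ha : a ∈ friends) :
    ∃ p, p < friends.length ∧ pvF friends p = a := by
  obtain ⟨p, hp, he⟩ := List.mem_iff_getElem.mp ha
  exact ⟨p, hp, by rw [pvF, List.getD_eq_getElem friends "" hp, he]⟩

-- a fold of key-dependent inserts: last write wins, value a function of the key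
theorem pv_keyed_fold (v : String → Int) (l : List String) (d : PySem.Dict String Int)
    (x : String) :
    ((l.foldl (fun d f => d.insert f (v f)) d).getD x 0)
      = if x ∈ l then v x else d.getD x 0 := by
  induction l generalizing d with
  | nil => simp
  | cons f t ih =>
    simp only [List.foldl_cons, ih, PySem.Dict.getD_insert, List.mem_cons]
    by_cases hx : x ∈ t <;> by_cases he : x = f <;> simp [hx, he]

-- specification-level values both ports are reduced to
def pvC (gifts : List String) (a b : String) : Int :=
  (gifts.countP (fun g => PySem.Str.split₀ g == [a, b]) : Int)

def pvR (friends gifts : List String) (i : Nat) : Int :=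
  ∑ j ∈ Finset.range friends.length,
    (pvC gifts (pvF friends i) (pvF friends j) - pvC gifts (pvF friends j) (pvF friends i))

-- 1 iff i wins the (i, j) pair
def pvWinInd (friends gifts : List String) (i j : Nat) : Int :=
  if pvC gifts (pvF friends i) (pvF friends j) > pvC gifts (pvF friends j) (pvF friends i) ∨
      (pvC gifts (pvF friends i) (pvF friends j) = pvC gifts (pvF friends j) (pvF friends i) ∧
        pvR friends gifts i > pvR friends gifts j) then 1 else 0

def pvTemp (friends gifts : List String) (i : Nat) : Int :=
  ∑ j ∈ Finset.range friends.length,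
    (if j = i then 0 else pvWinInd friends gifts i j)

def pvResult (friends gifts : List String) : Int :=
  (PySem.List.max? ((List.range friends.length).map (pvTemp friends gifts)) (fun x => x)).getD 0

-- the pair counter counts gifts "x y"
theorem pv_cnt_fold (gs : List String) (d : PySem.Dict (String × String) Int)
    (hv : ∀ g ∈ gs, (PySem.Str.split₀ g).length = 2) (x y : String) :
    ((gs.foldl pvCntStep d).getD (x, y) 0)
      = d.getD (x, y) 0 + (gs.countP (fun g => PySem.Str.split₀ g == [x, y]) : Int) := by
  induction gs generalizing d with
  | nil => simp
  | cons g t ih =>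
    obtain ⟨a, b, hab⟩ := List.length_eq_two.mp (hv g (by simp))
    have hstep : pvCntStep d g = d.insert (a, b) (d.getD (a, b) 0 + 1) := by
      simp [pvCntStep, hab]
    simp only [List.foldl_cons, hstep, ih _ (fun g hg => hv g (by simp [hg])),
      List.countP_cons, hab, PySem.Dict.getD_insert]
    by_cases he : (x, y) = (a, b)
    · obtain ⟨h1, h2⟩ := Prod.mk.injEq .. ▸ he
      simp_all
      ring
    · have : ¬([a, b] == [x, y]) = true := by
        simp only [beq_iff_eq, List.cons.injEq, and_true]
        intro ⟨h1, h2⟩; exact he (by simp [h1, h2])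
      simp [he, this]

-- the counter loop keeps its keys distinct
theorem pv_cnt_nodup (gs : List String) (d : PySem.Dict (String × String) Int)
    (h : d.keys.Nodup) : (gs.foldl pvCntStep d).keys.Nodup := by
  induction gs generalizing d with
  | nil => exact h
  | cons g t ih =>
    refine ih _ ?_
    unfold pvCntStep
    match PySem.Str.split₀ g with
    | [giver, taker] => exact PySem.Dict.nodup_keys_insert _ _ _ h
    | [] => exact h
    | [x] => exact h
    | x :: y :: z :: r => exact h

-- every key of the counter comes from a gift
theorem pv_cnt_mem (gs : List String) (d : PySem.Dict (String × String) Int)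
    (k : String × String) (h : (gs.foldl pvCntStep d).contains k = true) :
    d.contains k = true ∨ ∃ g ∈ gs, PySem.Str.split₀ g = [k.1, k.2] := by
  induction gs generalizing d with
  | nil => exact Or.inl h
  | cons g t ih =>
    rw [List.foldl_cons] at h
    rcases ih _ h with h1 | ⟨g', hg', he⟩
    · unfold pvCntStep at h1
      rcases hsp : PySem.Str.split₀ g with _ | ⟨a, tl⟩
      · rw [hsp] at h1; exact Or.inl h1
      · rcases tl with _ | ⟨b, tl2⟩
        · rw [hsp] at h1; exact Or.inl h1
        · rcases tl2 with _ | ⟨c, tl3⟩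
          · rw [hsp, PySem.Dict.contains_insert] at h1
            rcases Bool.or_eq_true_iff.mp h1 with h2 | h2
            · refine Or.inr ⟨g, by simp, ?_⟩
              have : k = (a, b) := by simpa using h2
              rw [hsp, this]
            · exact Or.inl h2
          · rw [hsp] at h1; exact Or.inl h1
    · exact Or.inr ⟨g', by simp [hg'], he⟩

-- the rate dict accumulates +1 per given, -1 per received gift
theorem pv_rate_fold (gs : List String) (d : PySem.Dict String Int)
    (hv : ∀ g ∈ gs, (PySem.Str.split₀ g).length = 2) (x : String) :
    ((gs.foldl pvRateStep d).getD x 0)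
      = d.getD x 0 + (gs.countP (fun g => (PySem.Str.split₀ g).getD 0 "" == x) : Int)
          - (gs.countP (fun g => (PySem.Str.split₀ g).getD 1 "" == x) : Int) := by
  induction gs generalizing d with
  | nil => simp
  | cons g t ih =>
    obtain ⟨a, b, hab⟩ := List.length_eq_two.mp (hv g (by simp))
    have hstep : pvRateStep d g = (d.modify a 0 (· + 1)).modify b 0 (· - 1) := by
      simp [pvRateStep, hab]
    simp only [List.foldl_cons, hstep, ih _ (fun g hg => hv g (by simp [hg])),
      List.countP_cons, hab, PySem.Dict.getD_modify]
    simp only [List.getD_cons_zero, List.getD_cons_succ]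
    split_ifs <;> simp_all <;> omega

def pvValid (friends : List String) (g : String) : Prop :=
  (PySem.Str.split₀ g).length = 2 ∧ ∀ t ∈ PySem.Str.split₀ g, t ∈ friends

-- a valid gift splits into two indexed friends
theorem pvValid_elim {friends : List String} {g : String} (h : pvValid friends g) :
    ∃ p q, p < friends.length ∧ q < friends.length ∧
      PySem.Str.split₀ g = [pvF friends p, pvF friends q] := by
  obtain ⟨a, b, hab⟩ := List.length_eq_two.mp h.1
  obtain ⟨p, hp, hpa⟩ := pvF_surj (h.2 a (by simp [hab]))
  obtain ⟨q, hq, hqb⟩ := pvF_surj (h.2 b (by simp [hab]))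
  exact ⟨p, q, hp, hq, by rw [hab, hpa, hqb]⟩

-- the giver-count of f i is the row sum of the pair counts
theorem pv_giver_sum {friends : List String} (hnd : friends.Nodup)
    (gs : List String) (hv : ∀ g ∈ gs, pvValid friends g) {i : Nat} :
    ((gs.countP (fun g => (PySem.Str.split₀ g).getD 0 "" == pvF friends i) : Int))
      = ∑ j ∈ Finset.range friends.length, pvC gs (pvF friends i) (pvF friends j) := by
  induction gs with
  | nil => simp [pvC]
  | cons g t ih =>
    obtain ⟨p, q, hp, hq, hpq⟩ := pvValid_elim (hv g (by simp))
    have hsum : ∀ (x : String), pvC (g :: t) (pvF friends i) x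
        = pvC t (pvF friends i) x
          + (if PySem.Str.split₀ g == [pvF friends i, x] then 1 else 0) := by
      intro x; simp only [pvC, List.countP_cons]; split_ifs <;> simp_all
    simp only [List.countP_cons, hsum, Finset.sum_add_distrib]
    rw [← ih (fun g hg => hv g (by simp [hg]))]
    have hone : (∑ j ∈ Finset.range friends.length,
        if PySem.Str.split₀ g == [pvF friends i, pvF friends j] then (1:Int) else 0)
        = if (PySem.Str.split₀ g).getD 0 "" == pvF friends i then 1 else 0 := by
      rw [hpq]
      by_cases hpi : pvF friends p = pvF friends i
      · have : ∀ j, j ∈ Finset.range friends.length →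
            ((([pvF friends p, pvF friends q] : List String) == [pvF friends i, pvF friends j]) = true
              ↔ q = j) := by
          intro j hj
          simp only [beq_iff_eq, List.cons.injEq, and_true]
          constructor
          · rintro ⟨-, h2⟩
            exact pvF_inj hnd hq (Finset.mem_range.mp hj) h2
          · rintro rfl; exact ⟨hpi, rfl⟩
        calc (∑ j ∈ Finset.range friends.length,
              if ([pvF friends p, pvF friends q] : List String) == [pvF friends i, pvF friends j] then (1:Int) else 0)
            = ∑ j ∈ Finset.range friends.length, if q = j then (1:Int) else 0 := by
              apply Finset.sum_congr rfl; intro j hj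
              simp only [this j hj]
          _ = 1 := by rw [Finset.sum_ite_eq]; simp [hq]
          _ = _ := by simp [hpi]
      · have : ∀ j, (([pvF friends p, pvF friends q] : List String) == [pvF friends i, pvF friends j]) = false := by
          intro j; simp only [beq_eq_false_iff_ne, ne_eq, List.cons.injEq, not_and]
          intro h; exact absurd h hpi
        simp [this, hpi]
    rw [hone]; push_cast; ring

-- the taker-count of f i is the column sum of the pair counts
theorem pv_taker_sum {friends : List String} (hnd : friends.Nodup)
    (gs : List String) (hv : ∀ g ∈ gs, pvValid friends g) {i : Nat} :
    ((gs.countP (fun g => (PySem.Str.split₀ g).getD 1 "" == pvF friends i) : Int))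
      = ∑ j ∈ Finset.range friends.length, pvC gs (pvF friends j) (pvF friends i) := by
  induction gs with
  | nil => simp [pvC]
  | cons g t ih =>
    obtain ⟨p, q, hp, hq, hpq⟩ := pvValid_elim (hv g (by simp))
    have hsum : ∀ (x : String), pvC (g :: t) x (pvF friends i)
        = pvC t x (pvF friends i)
          + (if PySem.Str.split₀ g == [x, pvF friends i] then 1 else 0) := by
      intro x; simp only [pvC, List.countP_cons]; split_ifs <;> simp_all
    simp only [List.countP_cons, hsum, Finset.sum_add_distrib]
    rw [← ih (fun g hg => hv g (by simp [hg]))]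
    have hone : (∑ j ∈ Finset.range friends.length,
        if PySem.Str.split₀ g == [pvF friends j, pvF friends i] then (1:Int) else 0)
        = if (PySem.Str.split₀ g).getD 1 "" == pvF friends i then 1 else 0 := by
      rw [hpq]
      by_cases hqi : pvF friends q = pvF friends i
      · have : ∀ j, j ∈ Finset.range friends.length →
            ((([pvF friends p, pvF friends q] : List String) == [pvF friends j, pvF friends i]) = true
              ↔ p = j) := by
          intro j hj
          simp only [beq_iff_eq, List.cons.injEq, and_true]
          constructor
          · rintro ⟨h1, -⟩
            exact pvF_inj hnd hp (Finset.mem_range.mp hj) h1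
          · rintro rfl; exact ⟨rfl, hqi⟩
        calc (∑ j ∈ Finset.range friends.length,
              if ([pvF friends p, pvF friends q] : List String) == [pvF friends j, pvF friends i] then (1:Int) else 0)
            = ∑ j ∈ Finset.range friends.length, if p = j then (1:Int) else 0 := by
              apply Finset.sum_congr rfl; intro j hj
              simp only [this j hj]
          _ = 1 := by rw [Finset.sum_ite_eq]; simp [hp]
          _ = _ := by simp [hqi]
      · have : ∀ j, (([pvF friends p, pvF friends q] : List String) == [pvF friends j, pvF friends i]) = false := by
          intro j; simp only [beq_eq_false_iff_ne, ne_eq, List.cons.injEq]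
          rintro ⟨-, h, -⟩; exact hqi h
        simp [this, hqi]
    rw [hone]; push_cast; ring

-- sum of a mapped list as a range sum
theorem pv_map_sum (l : List String) (h : String → Int) :
    (l.map h).sum = ∑ j ∈ Finset.range l.length, h (l.getD j "") := by
  induction l with
  | nil => simp
  | cons x t ih =>
    rw [List.map_cons, List.sum_cons, ih, List.length_cons, Finset.sum_range_succ']
    simp [add_comm]

theorem pv_getD_set {α : Type} (l : List α) (i j : Nat) (v d : α) (h : i < l.length) :
    (l.set i v).getD j d = if j = i then v else l.getD j d := by
  rw [List.getD_eq_getElem?_getD, List.getElem?_set, List.getD_eq_getElem?_getD]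
  by_cases h1 : i = j
  · subst h1; simp [h]
  · rw [if_neg h1, if_neg (fun hh => h1 hh.symm)]

-- entries of the record matrix
def pvE (rec : List (List Int)) (i j : Nat) : Int := (rec.getD i []).getD j 0

-- shape of the record matrix
def pvMat (n : Nat) (rec : List (List Int)) : Prop :=
  rec.length = n ∧ ∀ r ∈ rec, r.length = n

theorem pv_row_len {n : Nat} {rec : List (List Int)} (h : pvMat n rec) {i : Nat} (hi : i < n) :
    (rec.getD i []).length = n := by
  have hlt : i < rec.length := h.1 ▸ hi
  rw [List.getD_eq_getElem rec [] hlt]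
  exact h.2 _ (List.getElem_mem hlt)

-- one gift updates one entry
theorem pv_recStep_eq {friends : List String}
    (indexTable : PySem.Dict String Int)
    (hIT : ∀ i, i < friends.length → indexTable.getD (pvF friends i) 0 = (i : Int))
    {n : Nat} (hn : n = friends.length) {rec : List (List Int)}
    {g : String} {p q : Nat} (hp : p < n) (hq : q < n)
    (hg : PySem.Str.split₀ g = [pvF friends p, pvF friends q]) :
    pvRecStep indexTable rec g
      = rec.set p ((rec.getD p []).set q ((rec.getD p []).getD q 0 + 1)) := by
  have hgi : indexTable.getD (pvF friends p) 0 = (p : Int) := hIT p (hn ▸ hp)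
  have hti : indexTable.getD (pvF friends q) 0 = (q : Int) := hIT q (hn ▸ hq)
  simp only [pvRecStep, hg, hgi, hti, PySem.List.pySetD_natCast, PySem.List.pyGetD_natCast]

theorem pv_set_mat {n : Nat} {rec : List (List Int)} (hm : pvMat n rec)
    {p q : Nat} (hp : p < n) (w : Int) :
    pvMat n (rec.set p ((rec.getD p []).set q w)) := by
  refine ⟨by simp [hm.1], ?_⟩
  intro r hr
  rcases List.mem_or_eq_of_mem_set hr with h | h
  · exact hm.2 r h
  · rw [h, List.length_set]
    exact pv_row_len hm hp

theorem pv_set_entry {n : Nat} {rec : List (List Int)} (hm : pvMat n rec)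
    {p q : Nat} (hp : p < n) (hq : q < n) (w : Int) {i j : Nat} :
    pvE (rec.set p ((rec.getD p []).set q w)) i j
      = if i = p ∧ j = q then w else pvE rec i j := by
  rw [pvE, pv_getD_set _ _ _ _ _ (hm.1 ▸ hp)]
  by_cases hip : i = p
  · subst hip
    rw [if_pos rfl, pv_getD_set _ _ _ _ _ (by rw [pv_row_len hm hp]; exact hq)]
    by_cases hjq : j = q <;> simp [hjq, pvE]
  · rw [if_neg hip, if_neg (by rintro ⟨h, -⟩; exact hip h), pvE]

-- the gift loop adds pair counts entrywise
theorem pv_rec_fold {friends : List String} (hnd : friends.Nodup)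
    (indexTable : PySem.Dict String Int)
    (hIT : ∀ i, i < friends.length → indexTable.getD (pvF friends i) 0 = (i : Int))
    (gs : List String) (hv : ∀ g ∈ gs, pvValid friends g)
    (rec : List (List Int)) (hm : pvMat friends.length rec) :
    pvMat friends.length (gs.foldl (pvRecStep indexTable) rec)
      ∧ ∀ i j, i < friends.length → j < friends.length →
          pvE (gs.foldl (pvRecStep indexTable) rec) i j
            = pvE rec i j
              + (gs.countP (fun g => PySem.Str.split₀ g == [pvF friends i, pvF friends j]) : Int) := by
  induction gs generalizing rec with
  | nil => exact ⟨hm, by simp⟩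
  | cons g t ih =>
    obtain ⟨p, q, hp, hq, hpq⟩ := pvValid_elim (hv g (by simp))
    have hstep := pv_recStep_eq indexTable hIT rfl hp hq hpq (rec := rec)
    have hm' : pvMat friends.length (pvRecStep indexTable rec g) := by
      rw [hstep]; exact pv_set_mat hm hp _
    obtain ⟨hmf, hent⟩ := ih (fun g hg => hv g (by simp [hg])) _ hm'
    refine ⟨hmf, ?_⟩
    intro i j hi hj
    rw [List.foldl_cons, hent i j hi hj, hstep, pv_set_entry hm hp hq _,
      List.countP_cons]
    by_cases hc : i = p ∧ j = q
    · have htrue : (PySem.Str.split₀ g == [pvF friends i, pvF friends j]) = true := by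
        obtain ⟨rfl, rfl⟩ := hc; simp [hpq]
      rw [if_pos hc, htrue]
      obtain ⟨rfl, rfl⟩ := hc
      simp only [pvE, if_true]
      push_cast
      ring
    · have hfalse : (PySem.Str.split₀ g == [pvF friends i, pvF friends j]) = false := by
        rw [hpq, beq_eq_false_iff_ne]
        intro hh
        simp only [List.cons.injEq, and_true] at hh
        exact hc ⟨pvF_inj hnd hi hp hh.1.symm, pvF_inj hnd hj hq hh.2.symm⟩
      rw [if_neg hc, hfalse]
      push_cast
      ring

-- the diagonal loop writes -1 on the diagonal
theorem pv_diag_fold {n : Nat} (l : List Nat) (hl : ∀ k ∈ l, k < n)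
    (rec : List (List Int)) (hm : pvMat n rec) :
    pvMat n (l.foldl (fun rec k =>
        rec.set k ((rec.getD k []).set k (-1))) rec)
      ∧ ∀ i j, i < n → j < n →
          pvE (l.foldl (fun rec k => rec.set k ((rec.getD k []).set k (-1))) rec) i j
            = if i ∈ l ∧ i = j then -1 else pvE rec i j := by
  induction l generalizing rec with
  | nil => exact ⟨hm, by simp⟩
  | cons k t ih =>
    have hk := hl k (by simp)
    have hm' : pvMat n (rec.set k ((rec.getD k []).set k (-1))) := pv_set_mat hm hk _
    obtain ⟨hmf, hent⟩ := ih (fun k hk => hl k (by simp [hk])) _ hm'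
    refine ⟨hmf, ?_⟩
    intro i j hi hj
    rw [List.foldl_cons, hent i j hi hj, pv_set_entry hm hk hk _]
    by_cases h1 : i ∈ t ∧ i = j
    · obtain ⟨h1a, rfl⟩ := h1
      simp [h1a]
    · rw [if_neg h1]
      by_cases h2 : i = k ∧ j = k
      · obtain ⟨rfl, rfl⟩ := h2
        simp
      · rw [if_neg h2, if_neg]
        rintro ⟨hmem, rfl⟩
        rcases List.mem_cons.mp hmem with h | h
        · exact h2 ⟨h, h⟩
        · exact h1 ⟨h, rfl⟩

-- a fold of inserts keyed by distinct friends: lookup of f i gives v i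
theorem pv_insert_fold {friends : List String} (hnd : friends.Nodup) (v : Nat → Int)
    (l : List Nat) (hl : ∀ k ∈ l, k < friends.length)
    (d : PySem.Dict String Int) {i : Nat} (hi : i < friends.length) :
    ((l.foldl (fun d k => d.insert (pvF friends k) (v k)) d).getD (pvF friends i) 0)
      = if i ∈ l then v i else d.getD (pvF friends i) 0 := by
  induction l generalizing d with
  | nil => simp
  | cons k t ih =>
    rw [List.foldl_cons, ih (fun k hk => hl k (by simp [hk])) _]
    by_cases hit : i ∈ t
    · simp [hit]
    · rw [if_neg hit, PySem.Dict.getD_insert]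
      by_cases hik : i = k
      · subst hik; simp
      · rw [if_neg (fun hh => hik (pvF_inj hnd hi (hl k (by simp)) hh)), if_neg
          (by simp [hit, hik])]

-- range(len(friends)) after the PySem rewrite
theorem pv_range (n : Nat) :
    PySem.List.pyRange 0 (n : Int) 1 = (List.range n).map (fun (k : Nat) => (k : Int)) := by
  rw [PySem.List.pyRange_one]
  simp only [sub_zero, Int.toNat_natCast, zero_add]

-- entries of the zero matrix
theorem pv_rec0_entry (n : Nat) (i j : Nat) :
    pvE (List.map ((fun (_ : Int) => List.map ((fun (_ : Int) => (0:Int)) ∘ fun (k : Nat) => (k:Int))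
      (List.range n)) ∘ fun (k : Nat) => (k:Int)) (List.range n)) i j = 0 := by
  rw [pvE]
  by_cases hi : i < n
  · rw [show ((fun (_ : Int) => List.map ((fun (_ : Int) => (0:Int)) ∘ fun (k : Nat) => (k:Int))
        (List.range n)) ∘ fun (k : Nat) => (k:Int)) = (fun (_ : Nat) => List.map
        ((fun (_ : Int) => (0:Int)) ∘ fun (k : Nat) => (k:Int)) (List.range n)) from rfl,
      PySem.List.getD_map_range _ _ _ _ hi]
    by_cases hj : j < n
    · rw [PySem.List.getD_map_range _ _ _ _ hj]
      rfl
    · rw [List.getD_eq_default _ _ (by simpa using Nat.le_of_not_lt hj)]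
  · have houter : (List.map ((fun (_ : Int) => List.map ((fun (_ : Int) => (0:Int)) ∘
        fun (k : Nat) => (k:Int)) (List.range n)) ∘ fun (k : Nat) => (k:Int))
        (List.range n)).getD i [] = [] := by
      apply List.getD_eq_default
      simpa using Nat.le_of_not_lt hi
    rw [houter]
    simp

theorem pv_rec0_mat (n : Nat) :
    pvMat n (List.map ((fun (_ : Int) => List.map ((fun (_ : Int) => (0:Int)) ∘ fun (k : Nat) => (k:Int))
      (List.range n)) ∘ fun (k : Nat) => (k:Int)) (List.range n)) := by
  constructor
  · simp
  · intro r hr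
    rcases List.mem_map.mp hr with ⟨k, -, rfl⟩
    simp

theorem pv_A_eq (friends gifts : List String) (hnd : friends.Nodup)
    (hg : ∀ g ∈ gifts, pvValid friends g) :
    solution friends gifts = pvResult friends gifts := by
  have hv : ∀ g ∈ gifts, pvValid friends g := hg
  have hpv : ∀ k : Nat, friends.getD k "" = pvF friends k := fun _ => rfl
  have hpe : ∀ (rec : List (List Int)) (i j : Nat), ((rec.getD i []).getD j 0) = pvE rec i j :=
    fun _ _ _ => rfl
  simp only [solution, PySem.List.len_eq, pv_range, List.foldl_map, List.map_map,
    PySem.List.pyGetD_natCast, PySem.List.pySetD_natCast, Nat.cast_inj, hpv, hpe]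
  set IT := List.foldl (fun (x : PySem.Dict String Int) (y : Nat) =>
    x.insert (pvF friends y) (y : Int)) PySem.Dict.empty (List.range friends.length) with hIT0
  set r0 := List.map ((fun (_ : Int) => List.map ((fun (_ : Int) => (0:Int)) ∘
    fun (k : Nat) => (k:Int)) (List.range friends.length)) ∘ fun (k : Nat) => (k:Int))
    (List.range friends.length) with hr00
  set r1 := List.foldl (pvRecStep IT) r0 gifts with hr10
  set R := List.foldl (fun (x : List (List Int)) (y : Nat) =>
    x.set y ((x.getD y []).set y (-1))) r1 (List.range friends.length) with hR0
  set GRT := List.foldl (fun (x : PySem.Dict String Int) (y : Nat) =>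
    x.insert (pvF friends y)
      ((List.foldl (fun (s : Int × Int) (y_2 : Nat) =>
          (s.1 + pvE R y y_2, s.2 + pvE R y_2 y)) (0, 0) (List.range friends.length)).1 -
       (List.foldl (fun (s : Int × Int) (y_2 : Nat) =>
          (s.1 + pvE R y y_2, s.2 + pvE R y_2 y)) (0, 0) (List.range friends.length)).2))
    PySem.Dict.empty (List.range friends.length) with hGRT0
  have hIT : ∀ i, i < friends.length → IT.getD (pvF friends i) 0 = (i : Int) := by
    intro i hi
    rw [hIT0, pv_insert_fold hnd (fun k => (k : Int)) _ (fun k hk => by simpa using hk) _ hi,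
      if_pos (by simpa using hi)]
  have hmat0 : pvMat friends.length r0 := hr00 ▸ pv_rec0_mat friends.length
  obtain ⟨hm1, hent1⟩ := pv_rec_fold hnd IT hIT gifts hv r0 hmat0
  rw [← hr10] at hm1 hent1
  obtain ⟨hm2, hent2⟩ := pv_diag_fold (List.range friends.length) (fun k hk => by simpa using hk)
    r1 hm1
  rw [← hR0] at hent2
  have hE : ∀ i j, i < friends.length → j < friends.length →
      pvE R i j = if i = j then -1 else pvC gifts (pvF friends i) (pvF friends j) := by
    intro i j hi hj
    rw [hent2 i j hi hj, hent1 i j hi hj, hr00, pv_rec0_entry, zero_add]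
    by_cases hij : i = j
    · simp [hij, hj]
    · rw [if_neg (by rintro ⟨-, h⟩; exact hij h), if_neg hij, pvC]
  have hGRT : ∀ i, i < friends.length →
      GRT.getD (pvF friends i) 0 = pvR friends gifts i := by
    intro i hi
    rw [hGRT0, pv_insert_fold hnd
      (fun k => ((List.foldl (fun (s : Int × Int) (y_2 : Nat) =>
          (s.1 + pvE R k y_2, s.2 + pvE R y_2 k)) (0, 0) (List.range friends.length)).1 -
        (List.foldl (fun (s : Int × Int) (y_2 : Nat) =>
          (s.1 + pvE R k y_2, s.2 + pvE R y_2 k)) (0, 0) (List.range friends.length)).2))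
      _ (fun k hk => by simpa using hk) _ hi, if_pos (by simpa using hi)]
    rw [PySem.List.foldl_prod_mk (f := fun (a : Int) (y_2 : Nat) => a + pvE R i y_2)
      (g := fun (a : Int) (y_2 : Nat) => a + pvE R y_2 i)]
    simp only [PySem.List.foldl_add, zero_add]
    rw [show ((List.range friends.length).map (fun j => pvE R i j)).sum
        = ∑ j ∈ Finset.range friends.length, pvE R i j from rfl,
      show ((List.range friends.length).map (fun j => pvE R j i)).sum
        = ∑ j ∈ Finset.range friends.length, pvE R j i from rfl,
      pvR, ← Finset.sum_sub_distrib]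
    apply Finset.sum_congr rfl
    intro j hj
    rw [hE i j hi (Finset.mem_range.mp hj), hE j i (Finset.mem_range.mp hj) hi]
    by_cases hij : i = j
    · subst hij
      simp
    · rw [if_neg hij, if_neg (fun h => hij h.symm)]
  rw [PySem.List.foldl_append_singleton_eq_map, List.nil_append]
  have hmap : ∀ y ∈ List.range friends.length,
      (List.foldl (fun (x : Int) (y_1 : Nat) =>
        if y = y_1 then x
        else if pvE R y y_1 > pvE R y_1 y then x + 1
        else if pvE R y y_1 = pvE R y_1 y then
          (if GRT.getD (pvF friends y) 0 > GRT.getD (pvF friends y_1) 0 then x + 1 else x)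
        else x) 0 (List.range friends.length))
      = pvTemp friends gifts y := by
    intro y hy
    have hyn := List.mem_range.mp hy
    have hbody : (fun (x : Int) (y_1 : Nat) =>
        if y = y_1 then x
        else if pvE R y y_1 > pvE R y_1 y then x + 1
        else if pvE R y y_1 = pvE R y_1 y then
          (if GRT.getD (pvF friends y) 0 > GRT.getD (pvF friends y_1) 0 then x + 1 else x)
        else x)
        = fun (x : Int) (y_1 : Nat) => x +
          (if y = y_1 then 0
           else if pvE R y y_1 > pvE R y_1 y then 1
           else if pvE R y y_1 = pvE R y_1 y then
             (if GRT.getD (pvF friends y) 0 > GRT.getD (pvF friends y_1) 0 then 1 else 0)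
           else 0) := by
      funext x y1
      split_ifs <;> ring
    rw [hbody, PySem.List.foldl_add, zero_add]
    rw [show ((List.range friends.length).map (fun (y_1 : Nat) =>
        (if y = y_1 then (0:Int)
         else if pvE R y y_1 > pvE R y_1 y then 1
         else if pvE R y y_1 = pvE R y_1 y then
           (if GRT.getD (pvF friends y) 0 > GRT.getD (pvF friends y_1) 0 then 1 else 0)
         else 0))).sum
        = ∑ j ∈ Finset.range friends.length,
          (if y = j then (0:Int)
           else if pvE R y j > pvE R j y then 1
           else if pvE R y j = pvE R j y then
             (if GRT.getD (pvF friends y) 0 > GRT.getD (pvF friends j) 0 then 1 else 0)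
           else 0) from rfl, pvTemp]
    apply Finset.sum_congr rfl
    intro j hj
    have hjn := Finset.mem_range.mp hj
    by_cases hyj : y = j
    · rw [if_pos hyj, if_pos hyj.symm]
    · have hEyj : pvE R y j = pvC gifts (pvF friends y) (pvF friends j) := by
        rw [hE y j hyn hjn, if_neg hyj]
      have hEjy : pvE R j y = pvC gifts (pvF friends j) (pvF friends y) := by
        rw [hE j y hjn hyn, if_neg (show ¬(j = y) from fun h => hyj h.symm)]
      rw [if_neg hyj, if_neg (show ¬(j = y) from fun h => hyj h.symm), hEyj, hEjy,
        hGRT y hyn, hGRT j hjn, pvWinInd]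
      set ab := pvC gifts (pvF friends y) (pvF friends j) with hab
      set ba := pvC gifts (pvF friends j) (pvF friends y) with hba
      set ra := pvR friends gifts y with hra
      set rb := pvR friends gifts j with hrb
      split_ifs <;> omega
  rw [List.map_congr_left hmap, pvResult]

-- the index of a friend, as a member of friends
theorem pv_mem_of_lt {friends : List String} {m : Nat} (hm : m < friends.length) :
    pvF friends m ∈ friends := by
  rw [pvF, List.getD_eq_getElem friends "" hm]
  exact List.getElem_mem hm

-- a map over a list as a map over its index range
theorem pv_map_index (l : List String) (g : String → Int) :
    l.map g = (List.range l.length).map (fun i => g (l.getD i "")) := by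
  apply List.ext_getElem
  · simp
  · intro i h1 h2
    simp only [List.getElem_map, List.getElem_range]
    rw [List.getD_eq_getElem l "" (by simpa using h2)]

-- max over a nonempty list of zeros
theorem pv_max_map_zero {α : Type} (l : List α) (hl : l ≠ []) :
    (PySem.List.max? (l.map (fun _ => (0:Int))) (fun x => x)).getD 0 = 0 := by
  rcases hmax : PySem.List.max? (l.map (fun _ => (0:Int))) (fun x => x) with _ | m
  · rw [PySem.List.max?_eq_none_iff] at hmax
    exact absurd (List.map_eq_nil_iff.mp hmax) hl
  · have := PySem.List.max?_mem hmax
    rcases List.mem_map.mp this with ⟨-, -, rfl⟩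
    rfl

-- an insert fold whose values are all zero looks up to zero
theorem pv_insert_fold_zero {friends : List String} (v : Nat → Int) (l : List Nat)
    (hz : ∀ k ∈ l, v k = 0) (d : PySem.Dict String Int) (x : String)
    (h0 : d.getD x 0 = 0) :
    ((l.foldl (fun d k => d.insert (pvF friends k) (v k)) d).getD x 0) = 0 := by
  induction l generalizing d with
  | nil => exact h0
  | cons k t ih =>
    rw [List.foldl_cons]
    refine ih (fun k hk => hz k (by simp [hk])) _ ?_
    rw [PySem.Dict.getD_insert]
    split
    · exact hz k (by simp)
    · exact h0

theorem pv_A_nil (friends : List String) (hne : friends ≠ []) :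
    solution friends [] = 0 := by
  have hpv : ∀ k : Nat, friends.getD k "" = pvF friends k := fun _ => rfl
  have hpe : ∀ (rec : List (List Int)) (i j : Nat), ((rec.getD i []).getD j 0) = pvE rec i j :=
    fun _ _ _ => rfl
  simp only [solution, PySem.List.len_eq, pv_range, List.foldl_map, List.map_map,
    PySem.List.pyGetD_natCast, PySem.List.pySetD_natCast, Nat.cast_inj, hpv, hpe,
    List.foldl_nil]
  set r0 := List.map ((fun (_ : Int) => List.map ((fun (_ : Int) => (0:Int)) ∘
    fun (k : Nat) => (k:Int)) (List.range friends.length)) ∘ fun (k : Nat) => (k:Int))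
    (List.range friends.length) with hr00
  set R := List.foldl (fun (x : List (List Int)) (y : Nat) =>
    x.set y ((x.getD y []).set y (-1))) r0 (List.range friends.length) with hR0
  set GRT := List.foldl (fun (x : PySem.Dict String Int) (y : Nat) =>
    x.insert (pvF friends y)
      ((List.foldl (fun (s : Int × Int) (y_2 : Nat) =>
          (s.1 + pvE R y y_2, s.2 + pvE R y_2 y)) (0, 0) (List.range friends.length)).1 -
       (List.foldl (fun (s : Int × Int) (y_2 : Nat) =>
          (s.1 + pvE R y y_2, s.2 + pvE R y_2 y)) (0, 0) (List.range friends.length)).2))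
    PySem.Dict.empty (List.range friends.length) with hGRT0
  have hmat0 : pvMat friends.length r0 := hr00 ▸ pv_rec0_mat friends.length
  obtain ⟨hm2, hent2⟩ := pv_diag_fold (List.range friends.length)
    (fun k hk => by simpa using hk) r0 hmat0
  rw [← hR0] at hent2
  have hE : ∀ i j, i < friends.length → j < friends.length →
      pvE R i j = if i = j then -1 else 0 := by
    intro i j hi hj
    rw [hent2 i j hi hj, hr00, pv_rec0_entry]
    by_cases hij : i = j
    · simp [hij, hj]
    · rw [if_neg (by rintro ⟨-, h⟩; exact hij h), if_neg hij]
  have hGRT : ∀ x, GRT.getD x 0 = 0 := by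
    intro x
    rw [hGRT0]
    refine pv_insert_fold_zero _ _ ?_ _ _ (by simp)
    intro k hk
    have hkn := List.mem_range.mp hk
    rw [PySem.List.foldl_prod_mk (f := fun (a : Int) (y_2 : Nat) => a + pvE R k y_2)
      (g := fun (a : Int) (y_2 : Nat) => a + pvE R y_2 k)]
    simp only [PySem.List.foldl_add, zero_add]
    rw [show ((List.range friends.length).map (fun j => pvE R k j)).sum
        = ∑ j ∈ Finset.range friends.length, pvE R k j from rfl,
      show ((List.range friends.length).map (fun j => pvE R j k)).sum
        = ∑ j ∈ Finset.range friends.length, pvE R j k from rfl]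
    have e1 : (∑ j ∈ Finset.range friends.length, pvE R k j) = -1 := by
      rw [Finset.sum_congr rfl (fun j hj => hE k j hkn (Finset.mem_range.mp hj)),
        Finset.sum_ite_eq, if_pos (Finset.mem_range.mpr hkn)]
    have e2 : (∑ j ∈ Finset.range friends.length, pvE R j k) = -1 := by
      rw [Finset.sum_congr rfl (fun j hj => hE j k (Finset.mem_range.mp hj) hkn)]
      have hsw : ∀ j ∈ Finset.range friends.length,
          (if j = k then (-1:Int) else 0) = if k = j then -1 else 0 := by
        intro j _
        by_cases h : j = k
        · simp [h]
        · rw [if_neg h, if_neg (fun hh => h hh.symm)]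
      rw [Finset.sum_congr rfl hsw, Finset.sum_ite_eq, if_pos (Finset.mem_range.mpr hkn)]
    rw [e1, e2]
    ring
  have hmap : ∀ y ∈ List.range friends.length,
      (List.foldl (fun (x : Int) (y_1 : Nat) =>
        if y = y_1 then x
        else if pvE R y y_1 > pvE R y_1 y then x + 1
        else if pvE R y y_1 = pvE R y_1 y then
          (if GRT.getD (pvF friends y) 0 > GRT.getD (pvF friends y_1) 0 then x + 1 else x)
        else x) 0 (List.range friends.length))
      = (fun (_ : Nat) => (0 : Int)) y := by
    intro y hy
    have hyn := List.mem_range.mp hy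
    have hcongr := PySem.List.foldl_congr_mem
      (l := List.range friends.length) (init := (0:Int))
      (g := fun (x : Int) (_ : Nat) => x)
      (f := fun (x : Int) (y_1 : Nat) =>
        if y = y_1 then x
        else if pvE R y y_1 > pvE R y_1 y then x + 1
        else if pvE R y y_1 = pvE R y_1 y then
          (if GRT.getD (pvF friends y) 0 > GRT.getD (pvF friends y_1) 0 then x + 1 else x)
        else x)
      (fun acc j hj => by
        have hjn := List.mem_range.mp hj
        dsimp only
        by_cases hyj : y = j
        · rw [if_pos hyj]
        · rw [if_neg hyj, hE y j hyn hjn, hE j y hjn hyn, if_neg hyj,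
            if_neg (show ¬(j = y) from fun h => hyj h.symm), hGRT, hGRT]
          simp)
    rw [hcongr, PySem.List.foldl_ignore]
  rw [PySem.List.foldl_append_singleton_eq_map, List.nil_append,
    List.map_congr_left hmap, pv_max_map_zero]
  simpa using hne

-- ======== B-side lemmas ========

-- the per-item increment of B's correction loop, read off pvCorrStep
def pvDelta (cnt : PySem.Dict (String × String) Int) (rate : PySem.Dict String Int)
    (x : String) (kv : (String × String) × Int) : Int :=
  if kv.1.1 ≠ kv.1.2 ∧ (kv.1.1 < kv.1.2 ∨ ¬ cnt.contains (kv.1.2, kv.1.1) = true) then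
    if kv.2 - cnt.getD (kv.1.2, kv.1.1) 0 ≠ 0 then
      (if x = (if kv.2 - cnt.getD (kv.1.2, kv.1.1) 0 > 0 then kv.1.1 else kv.1.2) ∧
          rate.getD (if kv.2 - cnt.getD (kv.1.2, kv.1.1) 0 > 0 then kv.1.1 else kv.1.2) 0 ≤
            rate.getD (if kv.2 - cnt.getD (kv.1.2, kv.1.1) 0 > 0 then kv.1.2 else kv.1.1) 0
        then 1 else 0)
        + (if x = (if kv.2 - cnt.getD (kv.1.2, kv.1.1) 0 > 0 then kv.1.2 else kv.1.1) ∧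
            rate.getD (if kv.2 - cnt.getD (kv.1.2, kv.1.1) 0 > 0 then kv.1.2 else kv.1.1) 0 >
              rate.getD (if kv.2 - cnt.getD (kv.1.2, kv.1.1) 0 > 0 then kv.1.1 else kv.1.2) 0
          then -1 else 0)
    else 0
  else 0

-- lookup through the two conditional modifies of one correction step
theorem pv_two_mod (wins : PySem.Dict String Int) (w l x : String) (hwl : w ≠ l)
    (c1 c2 : Prop) [Decidable c1] [Decidable c2] :
    ((if c2 then (if c1 then wins.modify w 0 (· + 1) else wins).modify l 0 (· - 1)
      else (if c1 then wins.modify w 0 (· + 1) else wins)).getD x 0)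
      = wins.getD x 0 + ((if x = w ∧ c1 then 1 else 0) + (if x = l ∧ c2 then -1 else 0)) := by
  by_cases hxw : x = w <;> by_cases hxl : x = l
  · exact absurd (hxw.symm.trans hxl) hwl
  all_goals by_cases hc1 : c1 <;> by_cases hc2 : c2 <;>
    simp_all [PySem.Dict.getD_modify] <;> try omega

-- the correction loop is additive on every lookup
theorem pv_corr_getD (cnt : PySem.Dict (String × String) Int) (rate : PySem.Dict String Int)
    (items : List ((String × String) × Int)) (wins : PySem.Dict String Int) (x : String) :
    ((items.foldl (pvCorrStep cnt rate) wins).getD x 0)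
      = wins.getD x 0 + (items.map (pvDelta cnt rate x)).sum := by
  induction items generalizing wins with
  | nil => simp
  | cons kv t ih =>
    rw [List.foldl_cons, ih, List.map_cons, List.sum_cons]
    have hstep : (pvCorrStep cnt rate wins kv).getD x 0
        = wins.getD x 0 + pvDelta cnt rate x kv := by
      simp only [pvCorrStep, pvDelta]
      by_cases h1 : kv.1.1 ≠ kv.1.2 ∧ (kv.1.1 < kv.1.2 ∨ ¬ cnt.contains (kv.1.2, kv.1.1) = true)
      · rw [if_pos h1, if_pos h1]
        by_cases h2 : kv.2 - cnt.getD (kv.1.2, kv.1.1) 0 ≠ 0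
        · rw [if_pos h2, if_pos h2]
          have hwl : (if kv.2 - cnt.getD (kv.1.2, kv.1.1) 0 > 0 then kv.1.1 else kv.1.2)
              ≠ (if kv.2 - cnt.getD (kv.1.2, kv.1.1) 0 > 0 then kv.1.2 else kv.1.1) := by
            rcases h1 with ⟨hne, -⟩
            split_ifs
            · exact hne
            · exact fun h => hne h.symm
          exact pv_two_mod wins _ _ x hwl _ _
        · rw [if_neg h2, if_neg h2]
          ring
      · rw [if_neg h1, if_neg h1]
        ring
    rw [hstep]
    ring

-- modifying a present key keeps the key list
theorem pv_keys_modify_mem (d : PySem.Dict String Int) (k : String) (f : Int → Int)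
    (hk : k ∈ d.keys) : (d.modify k 0 f).keys = d.keys := by
  rw [PySem.Dict.keys_modify, PySem.Dict.keys_insert_of_contains]
  exact (PySem.Dict.contains_iff_mem_keys _ _).mpr hk

-- the correction loop never adds a key
theorem pv_corr_keys (cnt : PySem.Dict (String × String) Int) (rate : PySem.Dict String Int)
    (items : List ((String × String) × Int)) (wins : PySem.Dict String Int)
    (hmem : ∀ kv ∈ items, kv.1.1 ∈ wins.keys ∧ kv.1.2 ∈ wins.keys) :
    (items.foldl (pvCorrStep cnt rate) wins).keys = wins.keys := by
  induction items generalizing wins with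
  | nil => rfl
  | cons kv t ih =>
    have ha := (hmem kv (by simp)).1
    have hb := (hmem kv (by simp)).2
    have hk : (pvCorrStep cnt rate wins kv).keys = wins.keys := by
      simp only [pvCorrStep]
      by_cases h1 : kv.1.1 ≠ kv.1.2 ∧ (kv.1.1 < kv.1.2 ∨ ¬ cnt.contains (kv.1.2, kv.1.1) = true)
      · rw [if_pos h1]
        by_cases h2 : kv.2 - cnt.getD (kv.1.2, kv.1.1) 0 ≠ 0
        · rw [if_pos h2]
          set d := kv.2 - cnt.getD (kv.1.2, kv.1.1) 0 with hd
          have hw : (if d > 0 then kv.1.1 else kv.1.2) ∈ wins.keys := by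
            split_ifs
            · exact ha
            · exact hb
          have hl : (if d > 0 then kv.1.2 else kv.1.1) ∈ wins.keys := by
            split_ifs
            · exact hb
            · exact ha
          set w := if d > 0 then kv.1.1 else kv.1.2
          set l := if d > 0 then kv.1.2 else kv.1.1
          have h1keys : (if rate.getD w 0 ≤ rate.getD l 0
              then wins.modify w 0 (· + 1) else wins).keys = wins.keys := by
            split_ifs
            · exact pv_keys_modify_mem _ _ _ hw
            · rfl
          by_cases hc : rate.getD l 0 > rate.getD w 0
          · rw [if_pos hc, pv_keys_modify_mem _ _ _ (h1keys ▸ hl), h1keys]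
          · rw [if_neg hc, h1keys]
        · rw [if_neg h2]
      · rw [if_neg h1]
    rw [List.foldl_cons, ih _ (fun kv' hkv' => by
      rw [hk]; exact hmem kv' (by simp [hkv'])), hk]

-- a 0/1 indicator sum over a Nodup list is a membership test
theorem pv_sum_indicator (U : List Int) (hU : U.Nodup) (r : Int) :
    (U.map (fun u => if u = r then (1:Int) else 0)).sum = if r ∈ U then 1 else 0 := by
  induction U with
  | nil => simp
  | cons u t ih =>
    rw [List.map_cons, List.sum_cons, ih hU.of_cons]
    by_cases h1 : u = r <;> by_cases h2 : r ∈ t <;> (simp_all [List.nodup_cons]; try omega)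

-- summing per-value counts over the distinct values below v counts the elements below v
theorem pv_count_partition (v : Int) (U : List Int) (hU : U.Nodup)
    (hlt : ∀ u ∈ U, u < v) :
    ∀ (R : List Int), (∀ r ∈ R, r < v → r ∈ U) →
    (U.map (fun u => (R.count u : Int))).sum = (R.countP (fun r => decide (r < v)) : Int) := by
  intro R
  induction R with
  | nil => simp
  | cons r t ih =>
    intro hsub
    have hcnt : ∀ u ∈ U, ((r :: t).count u : Int)
        = (t.count u : Int) + (if u = r then 1 else 0) := by
      intro u _
      rw [List.count_cons]
      by_cases h : u = r
      · subst h; simp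
      · have : (r == u) = false := by simpa using fun hh => h hh.symm
        simp [this, h]
    rw [List.map_congr_left hcnt, PySem.List.sum_map_add_int,
      ih (fun x hx hxv => hsub x (by simp [hx]) hxv),
      pv_sum_indicator U hU r, List.countP_cons]
    by_cases h : r < v
    · rw [if_pos (hsub r (by simp) h)]
      have hd : (decide (r < v)) = true := by simpa using h
      rw [hd]
      simp
    · have hrm : r ∉ U := fun hm => h (hlt r hm)
      rw [if_neg hrm]
      have hd : (decide (r < v)) = false := by simpa using h
      rw [hd]
      simp

-- untouched keys of the prefix-sum fold
theorem pv_less_untouched (freq : PySem.Dict Int Int) (v : Int) :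
    ∀ (S : List Int), v ∉ S → ∀ (d : PySem.Dict Int Int) (acc : Int),
    (((S.foldl (fun (s : PySem.Dict Int Int × Int) u => (s.1.insert u s.2, s.2 + freq.getD u 0))
        (d, acc)).1).getD v 0) = d.getD v 0 := by
  intro S
  induction S with
  | nil => intro _ d acc; rfl
  | cons u t ih =>
    intro hv d acc
    rw [List.foldl_cons, ih (fun h => hv (by simp [h])),
      PySem.Dict.getD_insert, if_neg (fun h => hv (by simp [h]))]

-- the prefix-sum fold stores the running total at each key
theorem pv_less_fold (freq : PySem.Dict Int Int) (v : Int) :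
    ∀ (S₁ S₂ : List Int) (d : PySem.Dict Int Int) (acc : Int), v ∉ S₂ → (∀ u ∈ S₁, u ≠ v) →
    ((((S₁ ++ v :: S₂).foldl
        (fun (s : PySem.Dict Int Int × Int) u => (s.1.insert u s.2, s.2 + freq.getD u 0))
        (d, acc)).1).getD v 0)
      = acc + (S₁.map (fun u => freq.getD u 0)).sum := by
  intro S₁
  induction S₁ with
  | nil =>
    intro S₂ d acc hv2 _
    rw [List.nil_append, List.foldl_cons, pv_less_untouched freq v S₂ hv2,
      PySem.Dict.getD_insert, if_pos rfl]
    simp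
  | cons u t ih =>
    intro S₂ d acc hv2 hne
    rw [List.cons_append, List.foldl_cons,
      ih S₂ _ _ hv2 (fun u hu => hne u (by simp [hu])), List.map_cons, List.sum_cons]
    ring

-- dropping the zero terms of a mapped sum
theorem pv_sum_filter {α : Type} (l : List α) (f : α → Int) (p : α → Bool)
    (h : ∀ x ∈ l, p x = false → f x = 0) :
    (l.map f).sum = ((l.filter p).map f).sum := by
  induction l with
  | nil => simp
  | cons x t ih =>
    rw [List.map_cons, List.sum_cons, ih (fun x hx => h x (by simp [hx]))]
    by_cases hp : p x = true
    · rw [List.filter_cons_of_pos hp, List.map_cons, List.sum_cons]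
    · rw [List.filter_cons_of_neg (by simpa using hp), h x (by simp) (by simpa using hp)]
      ring

-- the correction sum over the counter items, re-indexed by the opposing friend
theorem pv_items_sum (friends gifts : List String) (hnd : friends.Nodup)
    (cnt : PySem.Dict (String × String) Int) (rate : PySem.Dict String Int)
    (hcnt : ∀ a b, cnt.getD (a, b) 0 = pvC gifts a b)
    (hck : cnt.keys.Nodup)
    (hcmem : ∀ k ∈ cnt.keys, k.1 ∈ friends ∧ k.2 ∈ friends)
    (hrate : ∀ j, j < friends.length → rate.getD (pvF friends j) 0 = pvR friends gifts j)
    (m : Nat) (hm : m < friends.length) :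
    (cnt.items.map (pvDelta cnt rate (pvF friends m))).sum
      = ∑ j ∈ Finset.range friends.length,
          (if j = m then 0
           else pvWinInd friends gifts m j
             - (if pvR friends gifts j < pvR friends gifts m then 1 else 0)) := by
  set n := friends.length with hn
  set p := pvF friends m with hp
  have hpmem : p ∈ friends := pv_mem_of_lt hm
  have hnotc : ∀ a b, cnt.contains (a, b) = false → pvC gifts a b = 0 := by
    intro a b h
    rw [← hcnt a b]
    exact PySem.Dict.getD_of_not_contains cnt 0 h
  have hposc : ∀ a b, pvC gifts a b ≠ 0 → cnt.contains (a, b) = true := by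
    intro a b h
    cases hc : cnt.contains (a, b)
    · exact absurd (hnotc a b hc) h
    · rfl
  have hitems : cnt.items = cnt.keys.map (fun k => (k, cnt.getD k 0)) :=
    PySem.Dict.items_eq_map_keys cnt hck 0
  have hitem_mem : ∀ k, cnt.contains k = true → (k, cnt.getD k 0) ∈ cnt.items := by
    intro k hk
    rw [hitems]
    exact List.mem_map.mpr ⟨k, (PySem.Dict.contains_iff_mem_keys _ _).mp hk, rfl⟩
  have hitem_val : ∀ kv ∈ cnt.items, kv.2 = cnt.getD kv.1 0 := by
    intro kv hkv
    have h2 : (kv.1, kv.2) ∈ cnt.items := by simpa using hkv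
    exact (PySem.Dict.getD_of_mem_items cnt h2 hck 0).symm
  have hitem_contains : ∀ kv ∈ cnt.items, cnt.contains kv.1 = true := by
    intro kv hkv
    exact (PySem.Dict.contains_iff_mem_keys _ _).mpr (PySem.Dict.mem_keys_of_mem_items _ hkv)
  have hfr : ∀ kv ∈ cnt.items, kv.1.1 ∈ friends ∧ kv.1.2 ∈ friends := by
    intro kv hkv
    exact hcmem kv.1 (PySem.Dict.mem_keys_of_mem_items _ hkv)
  have hidx_lt : ∀ q ∈ friends, friends.idxOf q < n := fun q hq =>
    List.idxOf_lt_length_of_mem hq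
  have hidx_get : ∀ q ∈ friends, pvF friends (friends.idxOf q) = q := by
    intro q hq
    rw [pvF, List.getD_eq_getElem friends "" (List.idxOf_lt_length_of_mem hq)]
    exact List.getElem_idxOf (List.idxOf_lt_length_of_mem hq)
  have hidx_self : ∀ j, j < n → friends.idxOf (pvF friends j) = j := by
    intro j hj
    refine pvF_inj hnd (hidx_lt _ (pv_mem_of_lt hj)) hj (hidx_get _ (pv_mem_of_lt hj))
  set P : ((String × String) × Int) → Bool := fun kv =>
    decide ((kv.1.1 = p ∨ kv.1.2 = p) ∧
      (kv.1.1 ≠ kv.1.2 ∧ (kv.1.1 < kv.1.2 ∨ ¬ cnt.contains (kv.1.2, kv.1.1) = true)) ∧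
      kv.2 - cnt.getD (kv.1.2, kv.1.1) 0 ≠ 0) with hP
  have hzero : ∀ kv, P kv = false → pvDelta cnt rate p kv = 0 := by
    intro kv hkv
    have hkv' : ¬ ((kv.1.1 = p ∨ kv.1.2 = p) ∧
        (kv.1.1 ≠ kv.1.2 ∧ (kv.1.1 < kv.1.2 ∨ ¬ cnt.contains (kv.1.2, kv.1.1) = true)) ∧
        kv.2 - cnt.getD (kv.1.2, kv.1.1) 0 ≠ 0) := by
      simpa [hP] using hkv
    unfold pvDelta
    by_cases h1 : (kv.1.1 ≠ kv.1.2 ∧ (kv.1.1 < kv.1.2 ∨ ¬ cnt.contains (kv.1.2, kv.1.1) = true))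
    · rw [if_pos h1]
      by_cases h2 : kv.2 - cnt.getD (kv.1.2, kv.1.1) 0 ≠ 0
      · rw [if_pos h2]
        have hnp : ¬ (kv.1.1 = p ∨ kv.1.2 = p) := fun hor => hkv' ⟨hor, h1, h2⟩
        push_neg at hnp
        have hw : p ≠ (if kv.2 - cnt.getD (kv.1.2, kv.1.1) 0 > 0 then kv.1.1 else kv.1.2) := by
          split_ifs
          · exact fun h => hnp.1 h.symm
          · exact fun h => hnp.2 h.symm
        have hl : p ≠ (if kv.2 - cnt.getD (kv.1.2, kv.1.1) 0 > 0 then kv.1.2 else kv.1.1) := by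
          split_ifs
          · exact fun h => hnp.2 h.symm
          · exact fun h => hnp.1 h.symm
        rw [if_neg (by rintro ⟨h, -⟩; exact hw h), if_neg (by rintro ⟨h, -⟩; exact hl h)]
        ring
      · rw [if_neg h2]
    · rw [if_neg h1]
  rw [pv_sum_filter cnt.items (pvDelta cnt rate p) P (fun kv _ hfalse => hzero kv hfalse)]
  have hinodup : cnt.items.Nodup := by
    have hk2 : (cnt.items.map (fun x => x.1)).Nodup := by
      simpa [PySem.Dict.keys] using hck
    exact hk2.of_map _
  have hLnd : (cnt.items.filter P).Nodup := hinodup.filter _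
  rw [← List.sum_toFinset _ hLnd]
  have hLmem : ∀ kv ∈ (cnt.items.filter P), kv ∈ cnt.items ∧ (kv.1.1 = p ∨ kv.1.2 = p) ∧
      (kv.1.1 ≠ kv.1.2 ∧ (kv.1.1 < kv.1.2 ∨ ¬ cnt.contains (kv.1.2, kv.1.1) = true)) ∧
      kv.2 - cnt.getD (kv.1.2, kv.1.1) 0 ≠ 0 := by
    intro kv hkv
    rcases List.mem_filter.mp hkv with ⟨h1, h2⟩
    refine ⟨h1, ?_⟩
    simpa [hP] using h2
  have htarget : (∑ j ∈ Finset.range n,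
        (if j = m then 0
         else pvWinInd friends gifts m j
           - (if pvR friends gifts j < pvR friends gifts m then 1 else 0)))
      = ∑ j ∈ (Finset.range n).filter
          (fun j => j ≠ m ∧ pvC gifts p (pvF friends j) ≠ pvC gifts (pvF friends j) p),
          (pvWinInd friends gifts m j
            - (if pvR friends gifts j < pvR friends gifts m then 1 else 0)) := by
    rw [Finset.sum_filter]
    apply Finset.sum_congr rfl
    intro j hj
    by_cases hjm : j = m
    · rw [if_pos hjm, if_neg (fun h => h.1 hjm)]
    · by_cases hCne : pvC gifts p (pvF friends j) ≠ pvC gifts (pvF friends j) p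
      · have hcond : j ≠ m ∧ pvC gifts p (pvF friends j) ≠ pvC gifts (pvF friends j) p :=
          ⟨hjm, hCne⟩
        rw [if_neg hjm, if_pos hcond]
      · have hcond2 : ¬ (j ≠ m ∧ pvC gifts p (pvF friends j) ≠ pvC gifts (pvF friends j) p) :=
          fun h => hCne h.2
        rw [if_neg hjm, if_neg hcond2]
        have hCeq : pvC gifts p (pvF friends j) = pvC gifts (pvF friends j) p :=
          not_ne_iff.mp hCne
        rw [pvWinInd, ← hp, hCeq]
        by_cases hr : pvR friends gifts m > pvR friends gifts j
        · have hc3 : pvC gifts (pvF friends j) p > pvC gifts (pvF friends j) p ∨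
              (pvC gifts (pvF friends j) p = pvC gifts (pvF friends j) p ∧
                pvR friends gifts m > pvR friends gifts j) := Or.inr ⟨rfl, hr⟩
          have hc4 : pvR friends gifts j < pvR friends gifts m := by omega
          rw [if_pos hc3, if_pos hc4]
          norm_num
        · have hc3 : ¬ (pvC gifts (pvF friends j) p > pvC gifts (pvF friends j) p ∨
              (pvC gifts (pvF friends j) p = pvC gifts (pvF friends j) p ∧
                pvR friends gifts m > pvR friends gifts j)) := by
            rintro (h | ⟨-, h⟩)
            · exact absurd h (lt_irrefl _)
            · exact hr h
          have hc4 : ¬ pvR friends gifts j < pvR friends gifts m := by omega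
          rw [if_neg hc3, if_neg hc4]
          norm_num
  rw [htarget]
  refine Finset.sum_nbij'
    (fun kv => friends.idxOf (if kv.1.1 = p then kv.1.2 else kv.1.1))
    (fun j => if cnt.contains (p, pvF friends j) = true ∧
        (p < pvF friends j ∨ ¬ cnt.contains (pvF friends j, p) = true)
      then ((p, pvF friends j), cnt.getD (p, pvF friends j) 0)
      else ((pvF friends j, p), cnt.getD (pvF friends j, p) 0))
    ?_ ?_ ?_ ?_ ?_
  · -- forward map lands in the target filter
    intro kv hkv
    rcases hLmem kv (List.mem_toFinset.mp hkv) with ⟨hin, hor, ⟨hab, hguard⟩, hd⟩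
    rcases hfr kv hin with ⟨ha, hb⟩
    have hval := hitem_val kv hin
    have hkey : cnt.getD kv.1 0 = pvC gifts kv.1.1 kv.1.2 := by
      rw [show kv.1 = (kv.1.1, kv.1.2) from rfl, hcnt]
    rw [Finset.mem_filter, Finset.mem_range]
    dsimp only
    by_cases hap : kv.1.1 = p
    · rw [if_pos hap]
      have hbp : kv.1.2 ≠ p := fun h => hab (hap.trans h.symm)
      refine ⟨hidx_lt _ hb, ?_, ?_⟩
      · intro h
        exact hbp (by rw [← hidx_get _ hb, h])
      · rw [hidx_get _ hb]
        intro h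
        apply hd
        rw [hval, hkey, hap, hcnt, h]
        omega
    · rw [if_neg hap]
      have hbp : kv.1.2 = p := by tauto
      refine ⟨hidx_lt _ ha, ?_, ?_⟩
      · intro h
        exact hap (by rw [← hidx_get _ ha, h])
      · rw [hidx_get _ ha]
        intro h
        apply hd
        rw [hval, hkey, hbp, hcnt, h]
        omega
  · -- backward map lands in the filtered items
    intro j hj
    rcases Finset.mem_filter.mp hj with ⟨hjr, hjm, hCne⟩
    have hjn : j < n := Finset.mem_range.mp hjr
    have hpq : p ≠ pvF friends j := fun h => hjm (pvF_inj hnd hjn hm h.symm)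
    rw [List.mem_toFinset, List.mem_filter]
    dsimp only
    by_cases hcase : cnt.contains (p, pvF friends j) = true ∧
        (p < pvF friends j ∨ ¬ cnt.contains (pvF friends j, p) = true)
    · rw [if_pos hcase]
      refine ⟨hitem_mem _ hcase.1, ?_⟩
      rw [hP]
      simp only [decide_eq_true_eq]
      refine ⟨by simp, ⟨hpq, hcase.2⟩, ?_⟩
      rw [hcnt, hcnt]
      intro h
      exact hCne (by omega)
    · rw [if_neg hcase]
      have hqp : cnt.contains (pvF friends j, p) = true := by
        by_cases h1 : cnt.contains (p, pvF friends j) = true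
        · by_contra h2
          have h2' : cnt.contains (pvF friends j, p) = false := by
            cases h : cnt.contains (pvF friends j, p)
            · rfl
            · exact absurd h h2
          exact hcase ⟨h1, Or.inr (by rw [h2']; exact Bool.false_ne_true)⟩
        · have h1' : cnt.contains (p, pvF friends j) = false := by
            cases h : cnt.contains (p, pvF friends j)
            · rfl
            · exact absurd h h1
          by_contra h2
          have h2' : cnt.contains (pvF friends j, p) = false := by
            cases h : cnt.contains (pvF friends j, p)
            · rfl
            · exact absurd h h2
          exact hCne (by rw [hnotc _ _ h1', hnotc _ _ h2'])
      refine ⟨hitem_mem _ hqp, ?_⟩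
      rw [hP]
      simp only [decide_eq_true_eq]
      refine ⟨by simp, ⟨fun h => hpq h.symm, ?_⟩, ?_⟩
      · by_cases h1 : cnt.contains (p, pvF friends j) = true
        · left
          rcases lt_or_gt_of_ne hpq with h | h
          · exact absurd ⟨h1, Or.inl h⟩ hcase
          · exact h
        · right
          simpa using h1
      · rw [hcnt, hcnt]
        intro h
        exact hCne (by omega)
  · -- left inverse
    intro kv hkv
    rcases hLmem kv (List.mem_toFinset.mp hkv) with ⟨hin, hor, ⟨hab, hguard⟩, hd⟩
    rcases hfr kv hin with ⟨ha, hb⟩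
    have hval := hitem_val kv hin
    dsimp only
    by_cases hap : kv.1.1 = p
    · rw [if_pos hap, hidx_get _ hb]
      have hc1 : cnt.contains (p, kv.1.2) = true := by
        rw [show (p, kv.1.2) = kv.1 from by rw [← hap]]
        exact hitem_contains kv hin
      have hcond : cnt.contains (p, kv.1.2) = true ∧
          (p < kv.1.2 ∨ ¬ cnt.contains (kv.1.2, p) = true) := by
        refine ⟨hc1, ?_⟩
        rcases hguard with h | h
        · exact Or.inl (hap ▸ h)
        · exact Or.inr (by rw [← hap]; exact h)
      rw [if_pos hcond]
      have heq : ((p, kv.1.2), cnt.getD (p, kv.1.2) 0) = (kv.1, kv.2) := by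
        rw [show (p, kv.1.2) = kv.1 from by rw [← hap], ← hval]
      rw [heq]
    · rw [if_neg hap]
      have hbp : kv.1.2 = p := by tauto
      rw [hidx_get _ ha]
      have hc1 : cnt.contains (kv.1.1, p) = true := by
        rw [show (kv.1.1, p) = kv.1 from by rw [← hbp]]
        exact hitem_contains kv hin
      have hcond : ¬ (cnt.contains (p, kv.1.1) = true ∧
          (p < kv.1.1 ∨ ¬ cnt.contains (kv.1.1, p) = true)) := by
        rintro ⟨h1, h2 | h2⟩
        · rcases hguard with h3 | h3
          · exact absurd (h2.trans (hbp ▸ h3)) (lt_irrefl _)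
          · exact h3 (by rw [hbp]; exact h1)
        · exact h2 hc1
      rw [if_neg hcond]
      have heq : ((kv.1.1, p), cnt.getD (kv.1.1, p) 0) = (kv.1, kv.2) := by
        rw [show (kv.1.1, p) = kv.1 from by rw [← hbp], ← hval]
      rw [heq]
  · -- right inverse
    intro j hj
    rcases Finset.mem_filter.mp hj with ⟨hjr, hjm, hCne⟩
    have hjn : j < n := Finset.mem_range.mp hjr
    have hpq : p ≠ pvF friends j := fun h => hjm (pvF_inj hnd hjn hm h.symm)
    dsimp only
    by_cases hcase : cnt.contains (p, pvF friends j) = true ∧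
        (p < pvF friends j ∨ ¬ cnt.contains (pvF friends j, p) = true)
    · rw [if_pos hcase]
      dsimp only
      rw [if_pos rfl]
      exact hidx_self j hjn
    · rw [if_neg hcase]
      dsimp only
      rw [if_neg (fun h => hpq h.symm)]
      exact hidx_self j hjn
  · -- values agree
    intro kv hkv
    rcases hLmem kv (List.mem_toFinset.mp hkv) with ⟨hin, hor, ⟨hab, hguard⟩, hd⟩
    rcases hfr kv hin with ⟨ha, hb⟩
    have hval := hitem_val kv hin
    have hkey : cnt.getD kv.1 0 = pvC gifts kv.1.1 kv.1.2 := by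
      rw [show kv.1 = (kv.1.1, kv.1.2) from rfl, hcnt]
    dsimp only
    unfold pvDelta
    rw [if_pos ⟨hab, hguard⟩, if_pos hd]
    by_cases hap : kv.1.1 = p
    · simp only [if_pos hap]
      have hpb : p ≠ kv.1.2 := fun h => hab (hap.trans h)
      set j := friends.idxOf kv.1.2 with hjd
      have hjn : j < n := hidx_lt _ hb
      have hjf : pvF friends j = kv.1.2 := hidx_get _ hb
      have hAB : kv.2 = pvC gifts (pvF friends m) (pvF friends j) := by
        rw [hval, hkey, hap, ← hp, hjf]
      have hBA : cnt.getD (kv.1.2, kv.1.1) 0 = pvC gifts (pvF friends j) (pvF friends m) := by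
        rw [show (kv.1.2, kv.1.1) = (kv.1.2, p) from by rw [hap], hcnt, ← hp, hjf]
      have hra : rate.getD kv.1.1 0 = pvR friends gifts m := by rw [hap, hp]; exact hrate m hm
      have hrb : rate.getD kv.1.2 0 = pvR friends gifts j := by rw [← hjf]; exact hrate j hjn
      rw [pvWinInd, ← hp]
      simp only [hAB, hBA] at hd ⊢
      set AB := pvC gifts (pvF friends m) (pvF friends j) with hABd
      set BA := pvC gifts (pvF friends j) (pvF friends m) with hBAd
      by_cases hD : AB - BA > 0
      · simp only [if_pos hD]
        simp only [hra, hrb]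
        set ra := pvR friends gifts m with hrad
        set rb := pvR friends gifts j with hrbd
        have hc2 : ¬ (p = kv.1.2 ∧ rb > ra) := fun h => hpb h.1
        rw [if_neg hc2]
        by_cases hr : ra ≤ rb
        · have hc1 : p = kv.1.1 ∧ ra ≤ rb := ⟨hap.symm, hr⟩
          have hc3 : AB > BA ∨ (AB = BA ∧ ra > rb) := Or.inl (by omega)
          have hc4 : ¬ rb < ra := by omega
          rw [if_pos hc1, if_pos hc3, if_neg hc4]
          norm_num
        · have hc1 : ¬ (p = kv.1.1 ∧ ra ≤ rb) := fun h => hr h.2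
          have hc3 : AB > BA ∨ (AB = BA ∧ ra > rb) := Or.inl (by omega)
          have hc4 : rb < ra := by omega
          rw [if_neg hc1, if_pos hc3, if_pos hc4]
          norm_num
      · simp only [if_neg hD]
        simp only [hra, hrb]
        set ra := pvR friends gifts m with hrad
        set rb := pvR friends gifts j with hrbd
        have hc1 : ¬ (p = kv.1.2 ∧ rb ≤ ra) := fun h => hpb h.1
        rw [if_neg hc1]
        by_cases hr : ra > rb
        · have hc2 : p = kv.1.1 ∧ ra > rb := ⟨hap.symm, hr⟩
          have hc3 : ¬ (AB > BA ∨ (AB = BA ∧ ra > rb)) := by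
            rintro (h | ⟨h, -⟩) <;> omega
          have hc4 : rb < ra := by omega
          rw [if_pos hc2, if_neg hc3, if_pos hc4]
          norm_num
        · have hc2 : ¬ (p = kv.1.1 ∧ ra > rb) := fun h => hr h.2
          have hc3 : ¬ (AB > BA ∨ (AB = BA ∧ ra > rb)) := by
            rintro (h | ⟨h, -⟩) <;> omega
          have hc4 : ¬ rb < ra := by omega
          rw [if_neg hc2, if_neg hc3, if_neg hc4]
          norm_num
    · simp only [if_neg hap]
      have hbp : kv.1.2 = p := by tauto
      have hpa : p ≠ kv.1.1 := fun h => hap h.symm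
      set j := friends.idxOf kv.1.1 with hjd
      have hjn : j < n := hidx_lt _ ha
      have hjf : pvF friends j = kv.1.1 := hidx_get _ ha
      have hAB : kv.2 = pvC gifts (pvF friends j) (pvF friends m) := by
        rw [hval, hkey, hbp, ← hp, hjf]
      have hBA : cnt.getD (kv.1.2, kv.1.1) 0 = pvC gifts (pvF friends m) (pvF friends j) := by
        rw [show (kv.1.2, kv.1.1) = (p, kv.1.1) from by rw [hbp], hcnt, ← hp, hjf]
      have hra : rate.getD kv.1.2 0 = pvR friends gifts m := by rw [hbp, hp]; exact hrate m hm
      have hrb : rate.getD kv.1.1 0 = pvR friends gifts j := by rw [← hjf]; exact hrate j hjn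
      rw [pvWinInd, ← hp]
      simp only [hAB, hBA] at hd ⊢
      set AB := pvC gifts (pvF friends m) (pvF friends j) with hABd
      set BA := pvC gifts (pvF friends j) (pvF friends m) with hBAd
      by_cases hD : BA - AB > 0
      · simp only [if_pos hD]
        simp only [hra, hrb]
        set ra := pvR friends gifts m with hrad
        set rb := pvR friends gifts j with hrbd
        have hc1 : ¬ (p = kv.1.1 ∧ rb ≤ ra) := fun h => hpa h.1
        rw [if_neg hc1]
        by_cases hr : ra > rb
        · have hc2 : p = kv.1.2 ∧ ra > rb := ⟨hbp.symm, hr⟩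
          have hc3 : ¬ (AB > BA ∨ (AB = BA ∧ ra > rb)) := by
            rintro (h | ⟨h, -⟩) <;> omega
          have hc4 : rb < ra := by omega
          rw [if_pos hc2, if_neg hc3, if_pos hc4]
          norm_num
        · have hc2 : ¬ (p = kv.1.2 ∧ ra > rb) := fun h => hr h.2
          have hc3 : ¬ (AB > BA ∨ (AB = BA ∧ ra > rb)) := by
            rintro (h | ⟨h, -⟩) <;> omega
          have hc4 : ¬ rb < ra := by omega
          rw [if_neg hc2, if_neg hc3, if_neg hc4]
          norm_num
      · simp only [if_neg hD]
        simp only [hra, hrb]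
        set ra := pvR friends gifts m with hrad
        set rb := pvR friends gifts j with hrbd
        have hc2 : ¬ (p = kv.1.1 ∧ rb > ra) := fun h => hpa h.1
        rw [if_neg hc2]
        by_cases hr : ra ≤ rb
        · have hc1 : p = kv.1.2 ∧ ra ≤ rb := ⟨hbp.symm, hr⟩
          have hc3 : AB > BA ∨ (AB = BA ∧ ra > rb) := Or.inl (by omega)
          have hc4 : ¬ rb < ra := by omega
          rw [if_pos hc1, if_pos hc3, if_neg hc4]
          norm_num
        · have hc1 : ¬ (p = kv.1.2 ∧ ra ≤ rb) := fun h => hr h.2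
          have hc3 : AB > BA ∨ (AB = BA ∧ ra > rb) := Or.inl (by omega)
          have hc4 : rb < ra := by omega
          rw [if_neg hc1, if_pos hc3, if_pos hc4]
          norm_num

-- set(list of zeros) is [0]
theorem pv_fold_add_zero : ∀ (t : List String),
    (t.map (fun _ => (0:Int))).foldl PySem.Set.add [0] = [0]
  | [] => rfl
  | y :: t' => by
    rw [List.map_cons, List.foldl_cons]
    have h : PySem.Set.add ([0] : PySem.Set Int) (0:Int) = [0] := by decide
    rw [h]
    exact pv_fold_add_zero t'

theorem pv_set_ofList_const (l : List String) (hl : l ≠ []) :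
    PySem.Set.ofList (l.map (fun _ => (0:Int))) = [0] := by
  rcases l with _ | ⟨x, t⟩
  · exact absurd rfl hl
  · rw [List.map_cons, PySem.Set.ofList_eq_foldl, List.foldl_cons]
    have h : PySem.Set.add ([] : PySem.Set Int) (0:Int) = [0] := by decide
    rw [h]
    exact pv_fold_add_zero t

theorem pv_B_eq (friends gifts : List String) (hnd : friends.Nodup)
    (hg : ∀ g ∈ gifts, pvValid friends g) :
    solution_alt friends gifts = pvResult friends gifts := by
  have hv : ∀ g ∈ gifts, pvValid friends g := hg
  simp only [solution_alt]
  rw [PySem.List.foldl_prod_mk]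
  set n := friends.length with hn
  set cnt := gifts.foldl pvCntStep PySem.Dict.empty with hcntd
  set rate := gifts.foldl pvRateStep
    (friends.foldl (fun d f => d.insert f 0) PySem.Dict.empty) with hrated
  have hcnt : ∀ a b, cnt.getD (a, b) 0 = pvC gifts a b := by
    intro a b
    rw [hcntd, pv_cnt_fold gifts _ (fun g hgg => (hv g hgg).1)]
    simp [pvC]
  have hck : cnt.keys.Nodup := by
    rw [hcntd]
    exact pv_cnt_nodup gifts _ (by simp)
  have hcmem : ∀ k ∈ cnt.keys, k.1 ∈ friends ∧ k.2 ∈ friends := by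
    intro k hk
    have hc : cnt.contains k = true := (PySem.Dict.contains_iff_mem_keys _ _).mpr hk
    rw [hcntd] at hc
    rcases pv_cnt_mem gifts _ k hc with h | ⟨g, hgm, hsp⟩
    · simp at h
    · have ht := (hv g hgm).2
      exact ⟨ht k.1 (by rw [hsp]; simp), ht k.2 (by rw [hsp]; simp)⟩
  have hrate : ∀ j, j < n → rate.getD (pvF friends j) 0 = pvR friends gifts j := by
    intro j hj
    rw [hrated, pv_rate_fold gifts _ (fun g hgg => (hv g hgg).1), pv_keyed_fold,
      if_pos (pv_mem_of_lt hj), pv_giver_sum hnd gifts hv, pv_taker_sum hnd gifts hv]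
    rw [pvR, Finset.sum_sub_distrib]
    ring
  set rates := friends.map (fun f => rate.getD f 0) with hratesd
  have hfreq : friends.foldl (fun (d : PySem.Dict Int Int) f =>
        d.insert (rate.getD f 0) (d.getD (rate.getD f 0) 0 + 1)) PySem.Dict.empty
      = PySem.Dict.counter rates := by
    rw [← PySem.Dict.foldl_insert_getD_add_one_eq_counter, hratesd, List.foldl_map]
  rw [hfreq]
  set freq := PySem.Dict.counter rates with hfreqd
  set S := PySem.List.sorted freq.keys (fun x => x) false with hSd
  have hSlt : S.Pairwise (· < ·) := by
    rw [hSd, hfreqd, PySem.Dict.keys_counter]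
    exact PySem.List.sorted_ofList_pairwise_lt rates
  have hSnd : S.Nodup := hSlt.imp ne_of_lt
  have hmemS : ∀ v, v ∈ S ↔ v ∈ rates := by
    intro v
    rw [hSd, PySem.List.mem_sorted, hfreqd, PySem.Dict.keys_counter, PySem.Set.mem_ofList]
  have hless : ∀ v ∈ S,
      ((S.foldl (fun (s : PySem.Dict Int Int × Int) u => (s.1.insert u s.2, s.2 + freq.getD u 0))
          (PySem.Dict.empty, 0)).1).getD v 0
        = (rates.countP (fun r => decide (r < v)) : Int) := by
    intro v hvS
    obtain ⟨S₁, S₂, hsplit⟩ := List.append_of_mem hvS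
    have hSlt' := hsplit ▸ hSlt
    have hSnd' := hsplit ▸ hSnd
    have hpw := List.pairwise_append.mp hSlt'
    have hlt1 : ∀ u ∈ S₁, u < v := fun u hu => hpw.2.2 u hu v (by simp)
    have hgt2 : ∀ u ∈ S₂, v < u := fun u hu => (List.pairwise_cons.mp hpw.2.1).1 u hu
    rw [hsplit, pv_less_fold freq v S₁ S₂ _ _
      (fun hvm => absurd (hgt2 v hvm) (lt_irrefl v)) (fun u hu => ne_of_lt (hlt1 u hu))]
    have hnd1 : S₁.Nodup := (List.nodup_append.mp hSnd').1
    have hmap : ∀ u ∈ S₁, freq.getD u 0 = (rates.count u : Int) := by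
      intro u _
      rw [hfreqd, PySem.Dict.getD_counter]
    rw [List.map_congr_left hmap, pv_count_partition v S₁ hnd1 hlt1 rates ?_]
    · rw [zero_add]
    · intro r hr hrv
      have hrS : r ∈ S₁ ++ v :: S₂ := by
        rw [← hsplit]
        exact (hmemS r).mpr hr
      rcases List.mem_append.mp hrS with h | h
      · exact h
      · rcases List.mem_cons.mp h with h | h
        · omega
        · exact absurd hrv (by have := hgt2 r h; omega)
  set less := ((S.foldl (fun (s : PySem.Dict Int Int × Int) u =>
      (s.1.insert u s.2, s.2 + freq.getD u 0)) (PySem.Dict.empty, 0)).1) with hlessd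
  set wins0 := friends.foldl (fun (d : PySem.Dict String Int) f =>
      d.insert f (less.getD (rate.getD f 0) 0)) PySem.Dict.empty with hwins0d
  have hwins0 : ∀ j, j < n → wins0.getD (pvF friends j) 0
      = ∑ i ∈ Finset.range n, (if pvR friends gifts i < pvR friends gifts j then (1:Int) else 0) := by
    intro j hj
    rw [hwins0d, pv_keyed_fold, if_pos (pv_mem_of_lt hj), hrate j hj]
    have hmem : pvR friends gifts j ∈ S := by
      rw [hmemS, hratesd]
      refine List.mem_map.mpr ⟨pvF friends j, pv_mem_of_lt hj, ?_⟩
      exact hrate j hj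
    rw [hlessd, hless _ hmem, hratesd, List.countP_map]
    simp only [Function.comp_def]
    have hsum := PySem.List.sum_map_ite_one_zero
      (fun f => decide (rate.getD f 0 < pvR friends gifts j)) friends
    rw [← hsum]
    rw [pv_map_sum friends (fun f => if (decide (rate.getD f 0 < pvR friends gifts j)) = true
        then (1:Int) else 0)]
    apply Finset.sum_congr rfl
    intro i hi
    have hin := Finset.mem_range.mp hi
    have hfi : friends.getD i "" = pvF friends i := rfl
    rw [hfi, hrate i hin]
    by_cases h : pvR friends gifts i < pvR friends gifts j
    · rw [if_pos (by simpa using h), if_pos h]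
    · rw [if_neg (by simpa using h), if_neg h]
  set wins2 := cnt.items.foldl (pvCorrStep cnt rate) wins0 with hwins2d
  have hwins2 : ∀ j, j < n → wins2.getD (pvF friends j) 0 = pvTemp friends gifts j := by
    intro j hj
    rw [hwins2d, pv_corr_getD, hwins0 j hj,
      pv_items_sum friends gifts hnd cnt rate hcnt hck hcmem hrate j hj,
      pvTemp, ← Finset.sum_add_distrib]
    apply Finset.sum_congr rfl
    intro i hi
    by_cases him : i = j
    · subst him
      simp
    · rw [if_neg him, if_neg him]
      ring
  have hkeys0 : wins0.keys = friends := by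
    rw [hwins0d, PySem.Dict.keys_foldl_insert friends
      (fun _ f => less.getD (rate.getD f 0) 0) PySem.Dict.empty,
      PySem.Dict.keys_empty, PySem.Set.update_nil_left,
      PySem.Set.ofList_eq_self_of_nodup friends hnd]
  have hkeys2 : wins2.keys = friends := by
    rw [hwins2d, pv_corr_keys cnt rate cnt.items wins0 ?_, hkeys0]
    intro kv hkv
    rw [hkeys0]
    exact hcmem kv.1 (PySem.Dict.mem_keys_of_mem_items _ hkv)
  rw [PySem.Dict.values_eq_map_keys wins2 (by rw [hkeys2]; exact hnd) 0, hkeys2,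
    pv_map_index]
  have hmapc : List.map (fun i => wins2.getD (friends.getD i "") 0)
      (List.range friends.length)
      = List.map (pvTemp friends gifts) (List.range friends.length) :=
    List.map_congr_left (fun i hi => hwins2 i (by simpa using hi))
  rw [hmapc]
  rfl

theorem pv_B_nil (friends : List String) (hne : friends ≠ []) :
    solution_alt friends [] = 0 := by
  simp only [solution_alt, List.foldl_nil]
  set rate := friends.foldl (fun (d : PySem.Dict String Int) f => d.insert f 0)
    PySem.Dict.empty with hrated
  have hr0 : ∀ x ∈ friends, rate.getD x 0 = 0 := by
    intro x hx
    rw [hrated, pv_keyed_fold (fun _ => 0), if_pos hx]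
  set freq := friends.foldl (fun (d : PySem.Dict Int Int) f =>
      d.insert (rate.getD f 0) (d.getD (rate.getD f 0) 0 + 1)) PySem.Dict.empty with hfreqd
  have hkeysf : freq.keys = [0] := by
    rw [hfreqd, PySem.Dict.keys_foldl_insert_key friends (fun f => rate.getD f 0)
      (fun d f => d.getD (rate.getD f 0) 0 + 1) PySem.Dict.empty,
      PySem.Dict.keys_empty, PySem.Set.update_nil_left,
      List.map_congr_left (fun x hx => hr0 x hx), pv_set_ofList_const friends hne]
  have hS : PySem.List.sorted freq.keys (fun x => x) false = [0] := by
    rw [hkeysf]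
    rfl
  set less := ((PySem.List.sorted freq.keys (fun x => x) false).foldl
      (fun (s : PySem.Dict Int Int × Int) u => (s.1.insert u s.2, s.2 + freq.getD u 0))
      (PySem.Dict.empty, 0)).1 with hlessd
  have hless0 : less.getD 0 0 = 0 := by
    rw [hlessd, hS, List.foldl_cons, List.foldl_nil]
    rw [PySem.Dict.getD_insert, if_pos rfl]
  set wins0 := friends.foldl (fun (d : PySem.Dict String Int) f =>
      d.insert f (less.getD (rate.getD f 0) 0)) PySem.Dict.empty with hwins0d
  have hw0 : ∀ x ∈ friends, wins0.getD x 0 = 0 := by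
    intro x hx
    rw [hwins0d, pv_keyed_fold, if_pos hx, hr0 x hx, hless0]
  have hitems : (PySem.Dict.empty : PySem.Dict (String × String) Int).items = [] := rfl
  rw [hitems, List.foldl_nil]
  have hkeys0 : wins0.keys = PySem.Set.ofList friends := by
    rw [hwins0d, PySem.Dict.keys_foldl_insert friends
      (fun _ f => less.getD (rate.getD f 0) 0) PySem.Dict.empty,
      PySem.Dict.keys_empty, PySem.Set.update_nil_left]
  have hknd : wins0.keys.Nodup := by
    rw [hkeys0]
    exact PySem.Set.nodup_ofList friends
  rw [PySem.Dict.values_eq_map_keys wins0 hknd 0,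
    List.map_congr_left (fun k hk => hw0 k (by
      rw [hkeys0] at hk
      exact (PySem.Set.mem_ofList _ _).mp hk)), pv_max_map_zero]
  intro hempty
  rw [hkeys0] at hempty
  rcases List.exists_mem_of_ne_nil friends hne with ⟨x, hx⟩
  rw [← PySem.Set.mem_ofList friends x] at hx
  rw [hempty] at hx
  exact absurd hx (List.not_mem_nil)

-- ===== VERDICT (by name: the statement is the Claim_ definition above) =====
theorem solution_spec : Claim_equal_solution := by
  intro friends gifts _ hpre
  obtain ⟨hne, hcase, hg⟩ := hpre
  unfold Spec_solution
  rcases hcase with hnd | rfl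
  · rw [pv_A_eq friends gifts hnd hg, pv_B_eq friends gifts hnd hg]
  · rw [pv_A_nil friends hne, pv_B_nil friends hne]
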